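-- pv_equiv track=rewrite | github.com/cafaray/atco.de-fights | increaseNumberRoundness.py | increaseNumberRoundness
-- ===== SOURCE A (Python) =====
-- def increaseNumberRoundness(n):
--     strn = str(n)[::-1]
--     f0 = False
--     for s in strn:
--         if s == '0' and f0:
--             return True
--         else:
--             if s!='0':
--                 f0 = True
--     return False
-- ===== SOURCE B (Python) =====
-- def increaseNumberRoundness(n):
--     return '0' in str(n).rstrip('0')
-- ===== Notes on version B (the rewrite author's own statement) =====
-- stated objective: simpler
-- what changed: Replaces the reverse-and-scan loop with a state flag by stripping the trailing run of '0' from str(n) and testing '0' membership in the remainder.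
import Mathlib
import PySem

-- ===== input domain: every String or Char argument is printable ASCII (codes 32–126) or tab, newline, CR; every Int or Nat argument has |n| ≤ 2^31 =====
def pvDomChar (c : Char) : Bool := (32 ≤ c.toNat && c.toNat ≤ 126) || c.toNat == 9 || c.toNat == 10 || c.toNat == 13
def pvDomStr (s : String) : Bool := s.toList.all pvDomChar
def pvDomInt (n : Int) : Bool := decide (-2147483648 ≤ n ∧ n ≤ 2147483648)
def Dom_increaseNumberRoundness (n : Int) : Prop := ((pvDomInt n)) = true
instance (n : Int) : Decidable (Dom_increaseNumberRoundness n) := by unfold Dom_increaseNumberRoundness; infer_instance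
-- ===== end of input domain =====

-- B replaces A's reversed scan with a boolean flag by strip-trailing-zeros then '0'-membership (objective: simpler).

-- ===== PORT A =====
-- the for-loop over str(n)[::-1] with early return and flag f0
def pvLoopA : List Char → Bool → Bool
  | [], _ => false
  | c :: rest, f0 =>
      if c = '0' ∧ f0 then true
      else pvLoopA rest (if c ≠ '0' then true else f0)

def increaseNumberRoundness (n : Int) : Bool :=
  -- strn = str(n)[::-1]  (s[::-1] is the reverse of the character list)
  let strn := (PySem.Int.toStr n).toList.reverse
  pvLoopA strn false

-- ===== PORT B =====
def increaseNumberRoundness_alt (n : Int) : Bool :=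
  -- t = str(n).rstrip('0') : drop the trailing run of '0' (exact, ported by hand: PySem has no rstrip-with-chars)
  let t := (((PySem.Int.toStr n).toList.reverse.dropWhile (· = '0')).reverse)
  -- '0' in t
  t.contains '0'

-- ===== PRECONDITION & SPEC =====
def Spec_increaseNumberRoundness (n : Int) (out : Bool) : Prop := out = increaseNumberRoundness_alt n
instance (n : Int) (out : Bool) : Decidable (Spec_increaseNumberRoundness n out) := by unfold Spec_increaseNumberRoundness; infer_instance

-- ===== CLAIM (what is proved, stated in full; the proofs are below) =====
def Claim_equal_increaseNumberRoundness : Prop := ∀ (n : Int), Dom_increaseNumberRoundness n → Spec_increaseNumberRoundness n (increaseNumberRoundness n)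

-- ===== LEMMAS AND PROOFS =====

-- once the flag is set, A's loop returns true iff some remaining char is '0'
theorem pvLoopA_true (xs : List Char) : pvLoopA xs true = xs.contains '0' := by
  induction xs with
  | nil => rfl
  | cons c rest ih =>
      by_cases h : c = '0' <;> simp [pvLoopA, h, ih, eq_comm]

-- with the flag clear, A's loop skips the leading run of '0' and then looks for a '0'
theorem pvLoopA_false (xs : List Char) :
    pvLoopA xs false = (xs.dropWhile (· = '0')).contains '0' := by
  induction xs with
  | nil => rfl
  | cons c rest ih =>
      by_cases h : c = '0'
      · simp [pvLoopA, h, ih, List.dropWhile]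
      · simp [pvLoopA, h, pvLoopA_true, List.dropWhile, eq_comm]

-- ===== VERDICT (by name: the statement is the Claim_ definition above) =====
theorem increaseNumberRoundness_spec : Claim_equal_increaseNumberRoundness := by
  intro n _
  unfold Spec_increaseNumberRoundness increaseNumberRoundness increaseNumberRoundness_alt
  simp [pvLoopA_false]
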